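-- pv_equiv track=rewrite | github.com/ahmetrasit/goat | app.py | organizeFileList
-- ===== SOURCE A (Python) =====
-- def organizeFileList(file_list):
--     organized_list = []
--     for parent in sorted(set([path.split('/')[0] for path in file_list])):
--         organized_list.append((f'<h5 class="mt-3"> {parent} </h5>', ''))
--         for file in [file for file in file_list if file.startswith(f'{parent}/')]:
--             #organized_list.append((file.split('/')[-1], file))
--             if file.startswith('original'):
--                 organized_list.append(('/'.join(file.split('/')[-2:]), file))
--             else:
--                 organized_list.append((file.split('/')[-1].replace('.json', ''), file))
--         organized_list.append(('', ''))
--     return organized_list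
-- ===== SOURCE B (Python) =====
-- def _entry(file):
--     if file.startswith('original'):
--         return ('/'.join(file.split('/')[-2:]), file)
--     return (file.split('/')[-1].replace('.json', ''), file)
--
--
-- def organizeFileList(file_list):
--     groups = {}
--     for file in file_list:
--         parts = file.split('/')
--         parent = parts[0]
--         if parent not in groups:
--             groups[parent] = []
--         if len(parts) > 1:
--             groups[parent].append(_entry(file))
--     organized_list = []
--     for parent in sorted(groups):
--         organized_list.append((f'<h5 class="mt-3"> {parent} </h5>', ''))
--         organized_list += groups[parent]
--         organized_list.append(('', ''))
--     return organized_list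
-- ===== Notes on version B (the rewrite author's own statement) =====
-- stated objective: faster
-- what changed: Replaces the per-parent rescan of the whole file list (sorted-set outer loop with an inner filter pass per parent) by a single pass that groups files into a dict keyed by first path segment, then emits the display tuples over the sorted keys.
import Mathlib
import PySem

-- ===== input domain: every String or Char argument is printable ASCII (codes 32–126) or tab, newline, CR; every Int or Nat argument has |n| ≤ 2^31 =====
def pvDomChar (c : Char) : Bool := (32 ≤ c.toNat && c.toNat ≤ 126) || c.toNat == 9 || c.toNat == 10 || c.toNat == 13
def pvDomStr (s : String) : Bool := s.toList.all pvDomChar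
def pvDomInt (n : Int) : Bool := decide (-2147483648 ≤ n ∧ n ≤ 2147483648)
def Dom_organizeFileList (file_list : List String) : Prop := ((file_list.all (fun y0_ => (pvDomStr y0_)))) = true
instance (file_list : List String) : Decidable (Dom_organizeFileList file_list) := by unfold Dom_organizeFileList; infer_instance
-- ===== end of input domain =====

-- B replaces A's per-parent rescan of the whole list (quadratic) by one grouping pass
-- into a dict keyed by the first path segment, then emits the tuples over the sorted keys.

-- ===== PORT A =====
-- the f-string header  f'<h5 class="mt-3"> {parent} </h5>'
def pvHeader (parent : String) : String := "<h5 class=\"mt-3\"> " ++ parent ++ " </h5>"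

-- the if/else producing one display tuple for a file (identical text in A and B).
-- file.split('/') with a non-empty separator never raises and never yields an empty
-- list, so the `.getD` defaults after split?/pyGet? are never taken.
def pvEntry (file : String) : String × String :=
  if PySem.Str.startswith file "original" then
    (PySem.Str.join "/" (PySem.List.slice ((PySem.Str.split? file "/").getD []) (some (-2)) none), file)
  else
    (PySem.Str.replace ((PySem.List.pyGet? ((PySem.Str.split? file "/").getD []) (-1)).getD "") ".json" "", file)

-- path.split('/')[0]
def pvParent (path : String) : String := ((PySem.Str.split? path "/").getD []).headD ""

def organizeFileList (file_list : List String) : List (String × String) :=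
  (PySem.List.sorted (PySem.Set.ofList (file_list.map (fun path => pvParent path))) (fun x => x) false).foldl
    (fun acc parent =>
      ((file_list.filter (fun file => PySem.Str.startswith file (parent ++ "/"))).foldl
        (fun acc file => acc ++ [pvEntry file])
        (acc ++ [(pvHeader parent, "")])) ++ [("", "")])
    []

-- ===== PORT B =====
-- one iteration of B's grouping loop
def pvStepB (d : PySem.Dict String (List (String × String))) (file : String) :
    PySem.Dict String (List (String × String)) :=
  let parts := (PySem.Str.split? file "/").getD []
  let parent := parts.headD ""
  let d := if d.contains parent then d else d.insert parent []
  if 1 < parts.length then d.modify parent [] (fun l => l ++ [pvEntry file]) else d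

def organizeFileList_alt (file_list : List String) : List (String × String) :=
  let groups := file_list.foldl pvStepB PySem.Dict.empty
  (PySem.List.sorted groups.keys (fun x => x) false).foldl
    (fun acc parent => ((acc ++ [(pvHeader parent, "")]) ++ groups.getD parent []) ++ [("", "")])
    []

-- ===== PRECONDITION & SPEC =====
def Spec_organizeFileList (file_list : List String) (out : List (String × String)) : Prop := out = organizeFileList_alt file_list
instance (file_list : List String) (out : List (String × String)) : Decidable (Spec_organizeFileList file_list out) := by unfold Spec_organizeFileList; infer_instance

-- ===== CLAIM (what is proved, stated in full; the proofs are below) =====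
def Claim_equal_organizeFileList : Prop := ∀ (file_list : List String), Dom_organizeFileList file_list → Spec_organizeFileList file_list (organizeFileList file_list)

-- ===== LEMMAS AND PROOFS =====

-- split on '/' as a simple structural recursion
def pvPieces : List Char → List Char → List (List Char)
  | [], cur => [cur.reverse]
  | c :: rest, cur => if c = '/' then cur.reverse :: pvPieces rest [] else pvPieces rest (c :: cur)

lemma pv_go_eq (fuel : Nat) (l cur : List Char) (acc : List (List Char)) (h : l.length < fuel) :
    PySem.Chars.splitOn.go ['/'] fuel l cur acc = acc.reverse ++ pvPieces l cur := by
  induction fuel generalizing l cur acc with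
  | zero => omega
  | succ f ih =>
    cases l with
    | nil => simp [PySem.Chars.splitOn.go, pvPieces]
    | cons c rest =>
      by_cases hc : c = '/'
      · subst hc
        rw [PySem.Chars.splitOn.go]
        simp only [List.isPrefixOf, BEq.rfl, Bool.true_and, if_pos, List.length_cons,
          List.length_nil, List.drop_succ_cons, List.drop_zero]
        rw [ih rest [] _ (by simpa using Nat.lt_of_succ_lt_succ h)]
        simp [pvPieces]
      · rw [PySem.Chars.splitOn.go]
        have hpre : List.isPrefixOf ['/'] (c :: rest) = false := by
          simp [List.isPrefixOf, Ne.symm hc]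
        rw [hpre]
        simp only [if_false, Bool.false_eq_true]
        rw [ih rest (c :: cur) acc (by simpa using Nat.lt_of_succ_lt_succ h)]
        simp [pvPieces, hc]

lemma pv_splitOn_eq (cs : List Char) : PySem.Chars.splitOn cs ['/'] = pvPieces cs [] := by
  unfold PySem.Chars.splitOn
  simpa using pv_go_eq (cs.length + 1) cs [] [] (by omega)

lemma pvPieces_spec (l cur : List Char) :
    ∃ t, pvPieces l cur = (cur.reverse ++ l.takeWhile (· ≠ '/')) :: t ∧ (t = [] ↔ '/' ∉ l) := by
  induction l generalizing cur with
  | nil => exact ⟨[], by simp [pvPieces]⟩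
  | cons c rest ih =>
    by_cases hc : c = '/'
    · subst hc
      obtain ⟨t, ht, _⟩ := ih ([] : List Char)
      refine ⟨pvPieces rest [], ?_, ?_⟩
      · simp [pvPieces]
      · rw [ht]; simp
    · obtain ⟨t, ht, hiff⟩ := ih (c :: cur)
      refine ⟨t, ?_, ?_⟩
      · rw [pvPieces, if_neg hc, ht]
        simp [List.takeWhile, hc]
      · rw [hiff]
        simp [Ne.symm hc]

-- the parts list file.split('/') at the String level
lemma pv_parts_eq (f : String) :
    (PySem.Str.split? f "/").getD [] = (pvPieces f.toList []).map String.ofList := by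
  have h : ("/" : String).toList = ['/'] := rfl
  simp [PySem.Str.split?, PySem.Chars.split?, h, pv_splitOn_eq]

lemma pv_parent_eq (f : String) : pvParent f = String.ofList (f.toList.takeWhile (· ≠ '/')) := by
  obtain ⟨t, ht, _⟩ := pvPieces_spec f.toList []
  simp [pvParent, pv_parts_eq, ht]

lemma pv_parent_toList (f : String) : (pvParent f).toList = f.toList.takeWhile (· ≠ '/') := by
  rw [pv_parent_eq, String.toList_ofList]

lemma pv_parent_no_slash (f : String) : '/' ∉ (pvParent f).toList := by
  rw [pv_parent_toList]
  intro hmem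
  have := List.mem_takeWhile_imp hmem
  simp at this

lemma pv_parts_len (f : String) :
    1 < ((PySem.Str.split? f "/").getD []).length ↔ '/' ∈ f.toList := by
  obtain ⟨t, ht, hiff⟩ := pvPieces_spec f.toList []
  rw [pv_parts_eq, ht]
  simp only [List.map_cons, List.length_cons, List.length_map]
  constructor
  · intro h
    by_contra hn
    have : t = [] := hiff.mpr hn
    simp [this] at h
  · intro h
    have : t ≠ [] := fun he => (hiff.mp he) h
    have : 0 < t.length := List.length_pos_iff.mpr this
    omega

-- head of a non-empty dropWhile fails the predicate (no such named lemma found by search)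
lemma pv_dropWhile_head_false (p : Char → Bool) (cs : List Char) (d : Char) (tl : List Char)
    (h : cs.dropWhile p = d :: tl) : p d = false := by
  induction cs with
  | nil => simp at h
  | cons c rest ih =>
    rw [List.dropWhile_cons] at h
    split at h
    · exact ih h
    · rename_i hc; cases h; simpa using hc

lemma pv_prefix_iff (p cs : List Char) (hp : '/' ∉ p) :
    p ++ ['/'] <+: cs ↔ cs.takeWhile (· ≠ '/') = p ∧ '/' ∈ cs := by
  constructor
  · rintro ⟨rest, rfl⟩
    have hl : (p ++ ['/'] ++ rest) = p ++ '/' :: rest := by simp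
    rw [hl]
    constructor
    · clear hl
      induction p with
      | nil => simp
      | cons a q ihq =>
        have ha : a ≠ '/' := fun h => hp (h ▸ List.mem_cons_self)
        have hq : '/' ∉ q := fun h => hp (List.mem_cons_of_mem _ h)
        simp only [List.cons_append, List.takeWhile_cons, ne_eq, ha, not_false_eq_true,
          decide_true, ihq hq]
        simp
    · simp
  · rintro ⟨htw, hmem⟩
    have hne : cs.dropWhile (· ≠ '/') ≠ [] := by
      intro he
      have := List.takeWhile_append_dropWhile (p := fun c => decide (c ≠ '/')) (l := cs)
      rw [he, List.append_nil] at this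
      rw [← this] at hmem
      have := List.mem_takeWhile_imp hmem
      simp at this
    obtain ⟨d, tl, hdt⟩ : ∃ d tl, cs.dropWhile (· ≠ '/') = d :: tl := by
      cases hcase : cs.dropWhile (· ≠ '/') with
      | nil => exact absurd hcase hne
      | cons d tl => exact ⟨d, tl, rfl⟩
    have hd : d = '/' := by simpa using pv_dropWhile_head_false _ _ _ _ hdt
    refine ⟨tl, ?_⟩
    have hsplit := List.takeWhile_append_dropWhile (p := fun c => decide (c ≠ '/')) (l := cs)
    rw [← hsplit, htw, hdt, hd]
    simp

-- A's filter test, characterised by B's grouping key and slash test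
lemma pv_filter_iff (p f : String) (hp : '/' ∉ p.toList) :
    PySem.Str.startswith f (p ++ "/") = true ↔
      (pvParent f = p ∧ 1 < ((PySem.Str.split? f "/").getD []).length) := by
  rw [PySem.Str.startswith_eq, PySem.Chars.startswith_iff, String.toList_append]
  have h : ("/" : String).toList = ['/'] := rfl
  rw [h, pv_prefix_iff _ _ hp, pv_parts_len]
  constructor
  · rintro ⟨htw, hmem⟩
    refine ⟨?_, hmem⟩
    rw [← String.toList_inj, pv_parent_toList, htw]
  · rintro ⟨hk, hmem⟩
    refine ⟨?_, hmem⟩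
    rw [← pv_parent_toList, hk]

lemma pv_keys_step (d : PySem.Dict String (List (String × String))) (f : String) :
    (pvStepB d f).keys = PySem.Set.add d.keys (pvParent f) := by
  have hparent : ((PySem.Str.split? f "/").getD []).headD "" = pvParent f := rfl
  have hbasekeys : (if d.contains (pvParent f) then d else d.insert (pvParent f) []).keys
      = PySem.Set.add d.keys (pvParent f) := by
    by_cases hc : d.contains (pvParent f)
    · have hmem : pvParent f ∈ d.keys := (PySem.Dict.contains_iff_mem_keys d _).mp hc
      simp [hc, PySem.Set.add, PySem.Set.contains, hmem]
    · have hc' : d.contains (pvParent f) = false := by simpa using hc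
      have hmem : pvParent f ∉ d.keys := fun h => hc ((PySem.Dict.contains_iff_mem_keys d _).mpr h)
      rw [if_neg hc, PySem.Dict.keys_insert_of_not_contains d _ hc']
      simp [PySem.Set.add, PySem.Set.contains, hmem]
  have hcont : (if d.contains (pvParent f) then d
      else d.insert (pvParent f) []).contains (pvParent f) = true := by
    by_cases hc : d.contains (pvParent f)
    · simp [hc]
    · simp [hc, PySem.Dict.contains_insert_self]
  simp only [pvStepB]
  rw [hparent]
  split
  · rw [PySem.Dict.keys_modify, PySem.Dict.keys_insert_of_contains _ _ hcont, hbasekeys]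
  · exact hbasekeys

lemma pv_keys_fold (l : List String) (d : PySem.Dict String (List (String × String))) :
    (l.foldl pvStepB d).keys = (l.map pvParent).foldl PySem.Set.add d.keys := by
  induction l generalizing d with
  | nil => rfl
  | cons f rest ih => simp [List.foldl_cons, ih, pv_keys_step]

lemma pv_getD_step (d : PySem.Dict String (List (String × String))) (f p : String)
    (hp : '/' ∉ p.toList) :
    (pvStepB d f).getD p [] =
      d.getD p [] ++ (if PySem.Str.startswith f (p ++ "/") then [pvEntry f] else []) := by
  have hparent : ((PySem.Str.split? f "/").getD []).headD "" = pvParent f := rfl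
  have hbase : (if d.contains (pvParent f) then d else d.insert (pvParent f) []).getD p [] =
      d.getD p [] := by
    split
    · rfl
    · rename_i hc
      have hc' : d.contains (pvParent f) = false := by simpa using hc
      by_cases hpk : p = pvParent f
      · subst hpk
        rw [PySem.Dict.getD_insert_self, PySem.Dict.getD_of_not_contains d _ hc']
      · exact PySem.Dict.getD_insert_of_ne _ _ _ hpk
  by_cases hsw : PySem.Str.startswith f (p ++ "/") = true
  · obtain ⟨hk, hlen⟩ := (pv_filter_iff p f hp).mp hsw
    simp only [pvStepB]
    rw [hparent, if_pos hlen, hsw, if_pos rfl, hk, PySem.Dict.getD_modify_self, hbase.symm, hk]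
  · rw [if_neg hsw, List.append_nil]
    simp only [pvStepB]
    rw [hparent]
    have hnot := fun h => hsw ((pv_filter_iff p f hp).mpr h)
    by_cases hlen : 1 < ((PySem.Str.split? f "/").getD []).length
    · have hpk : p ≠ pvParent f := fun he => hnot ⟨he.symm, hlen⟩
      rw [if_pos hlen, PySem.Dict.getD_modify_of_ne _ _ _ hpk, hbase]
    · rw [if_neg hlen, hbase]

lemma pv_getD_fold (l : List String) (d : PySem.Dict String (List (String × String)))
    (p : String) (hp : '/' ∉ p.toList) :
    (l.foldl pvStepB d).getD p [] =
      d.getD p [] ++ (l.filter (fun f => PySem.Str.startswith f (p ++ "/"))).map pvEntry := by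
  induction l generalizing d with
  | nil => simp
  | cons f rest ih =>
    rw [List.foldl_cons, ih, pv_getD_step d f p hp, List.filter_cons]
    split <;> rename_i h <;> simp_all

-- ===== VERDICT (by name: the statement is the Claim_ definition above) =====
theorem organizeFileList_spec : Claim_equal_organizeFileList := by
  intro file_list _
  unfold Spec_organizeFileList organizeFileList organizeFileList_alt
  have hkeys : (file_list.foldl pvStepB PySem.Dict.empty).keys =
      PySem.Set.ofList (file_list.map (fun path => pvParent path)) := by
    rw [pv_keys_fold, PySem.Dict.keys_empty, PySem.Set.ofList_eq_foldl]
  simp only [hkeys]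
  simp only [PySem.List.foldl_append_singleton_eq_map, List.append_assoc]
  rw [PySem.List.foldl_append_eq_flatMap
      (g := fun parent => [(pvHeader parent, "")] ++
        ((file_list.filter (fun file => PySem.Str.startswith file (parent ++ "/"))).map pvEntry
          ++ [("", "")])),
    PySem.List.foldl_append_eq_flatMap
      (g := fun parent => [(pvHeader parent, "")] ++
        ((file_list.foldl pvStepB PySem.Dict.empty).getD parent [] ++ [("", "")]))]
  simp only [List.nil_append]
  refine List.flatMap_congr ?_
  intro p hmemsorted
  have hmem : p ∈ file_list.map (fun path => pvParent path) := by
    have h1 := (PySem.List.sorted_perm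
      (PySem.Set.ofList (file_list.map (fun path => pvParent path))) (fun x => x) false).mem_iff.mp
      hmemsorted
    exact (PySem.Set.mem_ofList _ _).mp h1
  obtain ⟨g, _, hg⟩ := List.mem_map.mp hmem
  have hp : '/' ∉ p.toList := hg ▸ pv_parent_no_slash g
  rw [pv_getD_fold file_list PySem.Dict.empty p hp, PySem.Dict.getD_empty, List.nil_append]
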